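-- pv_equiv track=rewrite | github.com/jashvira/policy-gradient-experiments | experiments/sft/sft_train.py | create_data_loader
-- ===== SOURCE A (Python) =====
-- def create_data_loader(data, batch_size=4):
--     """Yield batches of raw prompts/responses; tokenization is done inside the train loop."""
--     batches = []
--     for i in range(0, len(data), batch_size):
--         chunk = data[i:i + batch_size]
--         batch = {
--             "prompts": [ex["prompt"] for ex in chunk],
--             "responses": [ex["response"] for ex in chunk],
--         }
--         batches.append(batch)
--     return batches
-- ===== SOURCE B (Python) =====
-- def create_data_loader(data, batch_size=4):
--     """Columns-first: extract the prompt/response columns once, then window them by index."""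
--     if batch_size <= 0:
--         return []
--     prompts = [ex["prompt"] for ex in data]
--     responses = [ex["response"] for ex in data]
--     return [
--         {"prompts": prompts[i:i + batch_size],
--          "responses": responses[i:i + batch_size]}
--         for i in range(0, len(data), batch_size)
--     ]
-- ===== Notes on version B (the rewrite author's own statement) =====
-- stated objective: alternative
-- what changed: A builds each batch by slicing the rows first and extracting the two columns inside each chunk; B inverts the nesting: it extracts the prompt and response columns in one pass over the whole data and then windows the two column lists by index.
import Mathlib
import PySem

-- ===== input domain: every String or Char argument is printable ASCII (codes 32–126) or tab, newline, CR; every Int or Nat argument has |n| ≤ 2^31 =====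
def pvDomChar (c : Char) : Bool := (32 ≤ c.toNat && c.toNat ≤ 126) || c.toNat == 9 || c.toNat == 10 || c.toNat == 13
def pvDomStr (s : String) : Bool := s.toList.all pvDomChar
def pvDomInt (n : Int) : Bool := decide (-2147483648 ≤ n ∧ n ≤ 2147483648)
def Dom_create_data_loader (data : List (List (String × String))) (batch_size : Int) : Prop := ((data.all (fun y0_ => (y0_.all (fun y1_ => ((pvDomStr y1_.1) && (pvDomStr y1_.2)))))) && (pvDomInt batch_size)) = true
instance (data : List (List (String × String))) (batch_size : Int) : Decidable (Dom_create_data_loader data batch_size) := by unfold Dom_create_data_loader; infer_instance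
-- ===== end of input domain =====

-- B inverts A's nesting: one pass extracting the prompt/response columns, then index windows over
-- the column lists (objective: alternative decomposition, same cost).

-- ex["prompt"]: first-match lookup in the association list; KeyError (missing key) is excluded by
-- Pre_ wherever A would reach the lookup, so the default "" is never observed.
def pvLookup (k : String) (ex : List (String × String)) : String :=
  (List.lookup k ex).getD ""

-- ===== PORT A =====
def create_data_loader (data : List (List (String × String))) (batch_size : Int) : List (List (String × List String)) :=
  (PySem.List.pyRange 0 data.length batch_size).foldl
    (fun batches i =>
      let chunk := PySem.List.slice data (some i) (some (i + batch_size))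
      batches ++ [[("prompts", chunk.map (pvLookup "prompt")),
                   ("responses", chunk.map (pvLookup "response"))]])
    []

-- ===== PORT B =====
def create_data_loader_alt (data : List (List (String × String))) (batch_size : Int) : List (List (String × List String)) :=
  if batch_size ≤ 0 then []
  else
    let prompts := data.map (pvLookup "prompt")
    let responses := data.map (pvLookup "response")
    (PySem.List.pyRange 0 data.length batch_size).map
      (fun i =>
        [("prompts", PySem.List.slice prompts (some i) (some (i + batch_size))),
         ("responses", PySem.List.slice responses (some i) (some (i + batch_size)))])

-- ===== PRECONDITION & SPEC =====
-- Exactly where Python A returns: batch_size = 0 raises ValueError (range step), and with a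
-- positive batch_size a row missing the "prompt" or "response" key raises KeyError.
def Pre_create_data_loader (data : List (List (String × String))) (batch_size : Int) : Prop :=
  batch_size ≠ 0 ∧
    (0 < batch_size →
      ∀ ex ∈ data, (List.lookup "prompt" ex).isSome ∧ (List.lookup "response" ex).isSome)
instance (data : List (List (String × String))) (batch_size : Int) : Decidable (Pre_create_data_loader data batch_size) := by unfold Pre_create_data_loader; infer_instance

def pvWitness_create_data_loader : (List (List (String × String))) × Int :=
  ([[("prompt", "p0"), ("response", "r0")], [("prompt", "p1"), ("response", "r1")],
    [("prompt", "p2"), ("response", "r2")]], 2)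

def Spec_create_data_loader (data : List (List (String × String))) (batch_size : Int) (out : List (List (String × List String))) : Prop := out = create_data_loader_alt data batch_size
instance (data : List (List (String × String))) (batch_size : Int) (out : List (List (String × List String))) : Decidable (Spec_create_data_loader data batch_size out) := by unfold Spec_create_data_loader; infer_instance

-- ===== CLAIM (what is proved, stated in full; the proofs are below) =====
def Claim_equal_create_data_loader : Prop := ∀ (data : List (List (String × String))) (batch_size : Int), Dom_create_data_loader data batch_size → Pre_create_data_loader data batch_size → Spec_create_data_loader data batch_size (create_data_loader data batch_size)

-- ===== LEMMAS AND PROOFS =====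

-- mapping a function commutes with Python slicing (slice only inspects the length)
theorem pv_map_slice {α β : Type} (f : α → β) (xs : List α) (a b : Int) :
    (PySem.List.slice xs (some a) (some b)).map f
      = PySem.List.slice (xs.map f) (some a) (some b) := by
  simp [PySem.List.slice, List.map_take, List.map_drop]

-- range(0, n, step) is empty for a natural n and negative step
theorem pv_pyRange_neg_empty (n : Nat) (step : Int) (h : step < 0) :
    PySem.List.pyRange 0 n step = [] := by
  have h1 : ¬ (0:Int) < step := by omega
  have h2 : ¬ (n:Int) < 0 := by omega
  simp only [PySem.List.pyRange, if_neg (show step ≠ 0 by omega), if_neg h1, if_neg h2,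
    sub_zero]
  simp

theorem create_data_loader_eq (data : List (List (String × String))) (batch_size : Int)
    (h : batch_size ≠ 0) :
    create_data_loader data batch_size = create_data_loader_alt data batch_size := by
  by_cases hpos : batch_size ≤ 0
  · have hneg : batch_size < 0 := lt_of_le_of_ne hpos h
    simp [create_data_loader, create_data_loader_alt, hpos,
      pv_pyRange_neg_empty data.length batch_size hneg]
  · simp only [create_data_loader, create_data_loader_alt, if_neg hpos]
    rw [PySem.List.foldl_append_singleton_eq_map]
    simp [pv_map_slice]

-- ===== VERDICT (by name: the statement is the Claim_ definition above) =====
theorem create_data_loader_spec : Claim_equal_create_data_loader := by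
  intro data batch_size _ hpre
  exact create_data_loader_eq data batch_size hpre.1
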